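-- pv_equiv track=rewrite | github.com/fangda-max/openclaw-skills | skills/entropy-audit/assets/tool/entropy_audit/lang/java/analyzers/semantic.py | _match_alias_tokens
-- ===== SOURCE A (Python) =====
-- def _match_alias_tokens(symbol_tokens: list[str], alias_tokens: list[str], match_position: str = "any") -> bool:
--     if not symbol_tokens or not alias_tokens or len(alias_tokens) > len(symbol_tokens):
--         return False
--     window = len(alias_tokens)
--     if match_position == "prefix":
--         return symbol_tokens[:window] == alias_tokens
--     if match_position == "suffix":
--         return symbol_tokens[-window:] == alias_tokens
--     for index in range(len(symbol_tokens) - window + 1):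
--         if symbol_tokens[index : index + window] == alias_tokens:
--             return True
--     return False
-- ===== SOURCE B (Python) =====
-- _MOD = (1 << 61) - 1
-- _BASE = 1000003
--
--
-- def _token_hash(token):
--     h = 0
--     for ch in token:
--         h = (h * 257 + ord(ch) + 1) % _MOD
--     return h
--
--
-- def _match_alias_tokens(symbol_tokens: list[str], alias_tokens: list[str], match_position: str = "any") -> bool:
--     n, m = len(symbol_tokens), len(alias_tokens)
--     if n == 0 or m == 0 or m > n:
--         return False
--     if match_position == "prefix":
--         return symbol_tokens[:m] == alias_tokens
--     if match_position == "suffix":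
--         return symbol_tokens[n - m:] == alias_tokens
--     # Rabin-Karp: roll a hash over windows of m tokens, compare tokens only on a hash hit.
--     sym = [_token_hash(t) for t in symbol_tokens]
--     target = 0
--     for t in alias_tokens:
--         target = (target * _BASE + _token_hash(t)) % _MOD
--     shift = pow(_BASE, m - 1, _MOD)
--     rolling = 0
--     for h in sym[:m]:
--         rolling = (rolling * _BASE + h) % _MOD
--     for start in range(n - m + 1):
--         if rolling == target and symbol_tokens[start:start + m] == alias_tokens:
--             return True
--         if start + m < n:
--             rolling = ((rolling - sym[start] * shift) * _BASE + sym[start + m]) % _MOD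
--     return False
-- ===== Notes on version B (the rewrite author's own statement) =====
-- stated objective: alternative
-- what changed: A's 'any' search slices the symbol list at every start index and compares the slice to the alias list; B runs a Rabin-Karp search: it hashes each token once, rolls a polynomial hash over the windows, and compares tokens only when the window hash hits the alias hash.
import Mathlib
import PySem

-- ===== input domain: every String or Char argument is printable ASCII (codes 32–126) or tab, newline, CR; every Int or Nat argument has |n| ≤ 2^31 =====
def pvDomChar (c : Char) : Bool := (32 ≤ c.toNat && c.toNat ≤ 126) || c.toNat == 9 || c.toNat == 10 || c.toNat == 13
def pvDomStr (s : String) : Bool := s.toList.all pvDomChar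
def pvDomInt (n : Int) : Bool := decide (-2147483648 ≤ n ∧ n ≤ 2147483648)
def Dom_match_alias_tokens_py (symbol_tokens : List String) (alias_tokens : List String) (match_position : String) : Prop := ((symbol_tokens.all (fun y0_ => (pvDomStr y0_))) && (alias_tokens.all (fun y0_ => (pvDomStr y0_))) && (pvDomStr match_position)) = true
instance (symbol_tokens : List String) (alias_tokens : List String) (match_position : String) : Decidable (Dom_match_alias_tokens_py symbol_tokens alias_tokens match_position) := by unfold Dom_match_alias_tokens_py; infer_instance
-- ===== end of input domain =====

-- B replaces A's slice-per-index scan in the "any" branch by a Rabin-Karp rolling-hash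
-- search that compares tokens only on a hash hit (objective: alternative algorithm).

-- ===== PORT A =====
def match_alias_tokens_py (symbol_tokens : List String) (alias_tokens : List String) (match_position : String) : Bool :=
  if symbol_tokens.isEmpty || alias_tokens.isEmpty || alias_tokens.length > symbol_tokens.length then
    false
  else
    let window := alias_tokens.length
    if match_position == "prefix" then
      PySem.List.slice symbol_tokens none (some (window : Int)) == alias_tokens
    else if match_position == "suffix" then
      PySem.List.slice symbol_tokens (some (-(window : Int))) none == alias_tokens
    else
      -- for index in range(len(symbol_tokens) - window + 1): if slice == alias: return True
      (PySem.List.pyRange 0 ((symbol_tokens.length : Int) - (window : Int) + 1) 1).any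
        (fun index => PySem.List.slice symbol_tokens (some index) (some (index + (window : Int))) == alias_tokens)

-- ===== PORT B =====
def pvMOD : Int := 2305843009213693951
def pvBASE : Int := 1000003

-- _token_hash: for ch in token: h = (h * 257 + ord(ch) + 1) % _MOD   (ord(ch) = ch.toNat, exact)
def pvTokenHash (t : String) : Int :=
  t.toList.foldl (fun h ch => PySem.Int.mod (h * 257 + (ch.toNat : Int) + 1) pvMOD) 0

-- the 'for start in range(n - m + 1)' loop of B, as recursion on the number of
-- remaining iterations; sym[i] is in range at every access, ported via pyGetD
def pvRkLoop (symbol_tokens alias_tokens : List String) (sym : List Int) (target shift : Int) :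
    Nat → Nat → Int → Bool
  | 0, _, _ => false
  | cnt + 1, start, rolling =>
    if rolling == target &&
        (PySem.List.slice symbol_tokens (some (start : Int))
          (some ((start : Int) + (alias_tokens.length : Int))) == alias_tokens) then
      true
    else
      pvRkLoop symbol_tokens alias_tokens sym target shift cnt (start + 1)
        (if start + alias_tokens.length < symbol_tokens.length then
          PySem.Int.mod ((rolling - PySem.List.pyGetD sym (start : Int) 0 * shift) * pvBASE
            + PySem.List.pyGetD sym ((start : Int) + (alias_tokens.length : Int)) 0) pvMOD
        else rolling)

def match_alias_tokens_py_alt (symbol_tokens : List String) (alias_tokens : List String) (match_position : String) : Bool :=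
  let n := symbol_tokens.length
  let m := alias_tokens.length
  if (n == 0) || (m == 0) || decide (m > n) then
    false
  else if match_position == "prefix" then
    PySem.List.slice symbol_tokens none (some (m : Int)) == alias_tokens
  else if match_position == "suffix" then
    PySem.List.slice symbol_tokens (some ((n : Int) - (m : Int))) none == alias_tokens
  else
    let sym := symbol_tokens.map pvTokenHash
    let target := alias_tokens.foldl (fun a t => PySem.Int.mod (a * pvBASE + pvTokenHash t) pvMOD) 0
    let shift := PySem.Int.powMod pvBASE (m - 1) pvMOD
    let rolling := (PySem.List.slice sym none (some (m : Int))).foldl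
      (fun r h => PySem.Int.mod (r * pvBASE + h) pvMOD) 0
    pvRkLoop symbol_tokens alias_tokens sym target shift (n - m + 1) 0 rolling

-- ===== PRECONDITION & SPEC =====
def Spec_match_alias_tokens_py (symbol_tokens : List String) (alias_tokens : List String) (match_position : String) (out : Bool) : Prop := out = match_alias_tokens_py_alt symbol_tokens alias_tokens match_position
instance (symbol_tokens : List String) (alias_tokens : List String) (match_position : String) (out : Bool) : Decidable (Spec_match_alias_tokens_py symbol_tokens alias_tokens match_position out) := by unfold Spec_match_alias_tokens_py; infer_instance

-- ===== CLAIM =====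
def Claim_equal_match_alias_tokens_py : Prop := ∀ (symbol_tokens : List String) (alias_tokens : List String) (match_position : String), Dom_match_alias_tokens_py symbol_tokens alias_tokens match_position → Spec_match_alias_tokens_py symbol_tokens alias_tokens match_position (match_alias_tokens_py symbol_tokens alias_tokens match_position)

-- ===== LEMMAS AND PROOFS =====

theorem pvMOD_pos : (0 : Int) < pvMOD := by norm_num [pvMOD]

-- the un-reduced polynomial hash of a list of token hashes
def pvPoly (l : List Int) : Int := l.foldl (fun a h => a * pvBASE + h) 0

theorem pvMod_eq (a : Int) : PySem.Int.mod a pvMOD = a % pvMOD :=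
  PySem.Int.mod_eq_emod_of_pos pvMOD_pos

theorem pvModEq_self (a : Int) : a % pvMOD ≡ a [ZMOD pvMOD] :=
  Int.emod_emod_of_dvd a dvd_rfl

-- folding with a mod at every step equals the pure fold reduced once
theorem foldl_modStep (l : List Int) (r : Int) :
    l.foldl (fun r h => PySem.Int.mod (r * pvBASE + h) pvMOD) (r % pvMOD)
      = (l.foldl (fun a h => a * pvBASE + h) r) % pvMOD := by
  induction l generalizing r with
  | nil => rfl
  | cons h t ih =>
    have hacc : PySem.Int.mod ((r % pvMOD) * pvBASE + h) pvMOD = (r * pvBASE + h) % pvMOD := by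
      rw [pvMod_eq]
      exact ((pvModEq_self r).mul_right pvBASE).add_right h
    simp only [List.foldl_cons]
    rw [hacc]
    exact ih (r * pvBASE + h)

theorem foldl_modStep_zero (l : List Int) :
    l.foldl (fun r h => PySem.Int.mod (r * pvBASE + h) pvMOD) 0 = pvPoly l % pvMOD := by
  have := foldl_modStep l 0
  rwa [show (0 : Int) % pvMOD = 0 from Int.zero_emod _] at this

theorem pvPoly_shift (l : List Int) (s : Int) :
    l.foldl (fun a h => a * pvBASE + h) s = s * pvBASE ^ l.length + pvPoly l := by
  induction l generalizing s with
  | nil => simp [pvPoly]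
  | cons h t ih =>
    simp only [List.foldl_cons, List.length_cons, pvPoly] at *
    rw [ih (s * pvBASE + h), ih (0 * pvBASE + h)]
    ring

theorem pvPoly_cons (a : Int) (t : List Int) :
    pvPoly (a :: t) = a * pvBASE ^ t.length + pvPoly t := by
  have := pvPoly_shift t (0 * pvBASE + a)
  simpa [pvPoly] using this

theorem pvPoly_append_singleton (t : List Int) (b : Int) :
    pvPoly (t ++ [b]) = pvPoly t * pvBASE + b := by
  simp [pvPoly, List.foldl_append]

-- the rolling-hash update is exact modulo pvMOD
theorem roll_update (a b : Int) (mid : List Int) :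
    ((pvPoly (a :: mid) % pvMOD - a * (pvBASE ^ mid.length % pvMOD)) * pvBASE + b) % pvMOD
      = pvPoly (mid ++ [b]) % pvMOD := by
  have e1 : (pvPoly (a :: mid) % pvMOD - a * (pvBASE ^ mid.length % pvMOD)) * pvBASE + b
      ≡ (pvPoly (a :: mid) - a * pvBASE ^ mid.length) * pvBASE + b [ZMOD pvMOD] :=
    (((pvModEq_self _).sub ((pvModEq_self _).mul_left a)).mul_right pvBASE).add_right b
  have e2 : (pvPoly (a :: mid) - a * pvBASE ^ mid.length) * pvBASE + b = pvPoly (mid ++ [b]) := by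
    rw [pvPoly_cons, pvPoly_append_singleton]; ring
  calc ((pvPoly (a :: mid) % pvMOD - a * (pvBASE ^ mid.length % pvMOD)) * pvBASE + b) % pvMOD
      = ((pvPoly (a :: mid) - a * pvBASE ^ mid.length) * pvBASE + b) % pvMOD := e1
    _ = pvPoly (mid ++ [b]) % pvMOD := by rw [e2]

-- token-window equality forces hash equality
theorem winHash_eq (S A : List String) (k : Nat) (h : (S.drop k).take A.length = A) :
    pvPoly (((S.map pvTokenHash).drop k).take A.length) = pvPoly (A.map pvTokenHash) := by
  rw [← List.map_drop, ← List.map_take, h]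

-- the main loop invariant: rolling always carries the hash of the current window
theorem pvRkLoop_iff (S A : List String) (hA : A ≠ []) (hm : A.length ≤ S.length) :
    ∀ (cnt start : Nat), start + cnt = S.length - A.length + 1 →
    ∀ rolling, rolling = pvPoly (((S.map pvTokenHash).drop start).take A.length) % pvMOD →
    (pvRkLoop S A (S.map pvTokenHash) (pvPoly (A.map pvTokenHash) % pvMOD)
        (pvBASE ^ (A.length - 1) % pvMOD) cnt start rolling = true
      ↔ ∃ j, j < cnt ∧ (S.drop (start + j)).take A.length = A) := by
  intro cnt
  induction cnt with
  | zero => intro start _ rolling _; simp [pvRkLoop]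
  | succ c ih =>
    intro start hcnt rolling hroll
    rw [pvRkLoop]
    rw [PySem.List.slice_natCast_add]
    by_cases hw : (S.drop start).take A.length = A
    · have : rolling = pvPoly (A.map pvTokenHash) % pvMOD := by
        rw [hroll, winHash_eq S A start hw]
      simp only [this, beq_self_eq_true, hw, Bool.and_self, if_true, true_iff]
      exact ⟨0, Nat.succ_pos c, by simpa using hw⟩
    · have hcond : ((rolling == pvPoly (A.map pvTokenHash) % pvMOD) &&
          ((S.drop start).take A.length == A)) = false := by
        simp [hw]
      rw [hcond, if_neg (by simp)]
      rcases Nat.eq_zero_or_pos c with hc | hc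
      · subst hc
        simp only [pvRkLoop, Bool.false_eq_true, false_iff]
        rintro ⟨j, hj, hje⟩
        interval_cases j
        exact hw hje
      · -- start + 1 + A.length ≤ S.length, so the rolling update fires and stays exact
        have hlt : start + A.length < S.length := by omega
        have hupd : (if start + A.length < S.length then
            PySem.Int.mod ((rolling - PySem.List.pyGetD (S.map pvTokenHash) (start : Int) 0
                * (pvBASE ^ (A.length - 1) % pvMOD)) * pvBASE
              + PySem.List.pyGetD (S.map pvTokenHash) ((start : Int) + (A.length : Int)) 0) pvMOD
          else rolling)
            = pvPoly (((S.map pvTokenHash).drop (start + 1)).take A.length) % pvMOD := by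
          rw [if_pos hlt]
          have hsx : start < (S.map pvTokenHash).length := by simp; omega
          have hsx2 : start + A.length < (S.map pvTokenHash).length := by simp; omega
          have hg1 : PySem.List.pyGetD (S.map pvTokenHash) (start : Int) 0
              = (S.map pvTokenHash)[start] := by
            rw [PySem.List.pyGetD_natCast, List.getD_eq_getElem _ _ hsx]
          have hg2 : PySem.List.pyGetD (S.map pvTokenHash) ((start : Int) + (A.length : Int)) 0
              = (S.map pvTokenHash)[start + A.length] := by
            rw [show ((start : Int) + (A.length : Int)) = ((start + A.length : Nat) : Int) by
              push_cast; ring]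
            rw [PySem.List.pyGetD_natCast, List.getD_eq_getElem _ _ hsx2]
          set H := S.map pvTokenHash with hH
          set mid := (H.drop (start + 1)).take (A.length - 1) with hmid
          have hlenH : H.length = S.length := by simp [hH]
          have hApos : 0 < A.length := List.length_pos_iff.mpr hA
          have hmidlen : mid.length = A.length - 1 := by
            rw [hmid]
            simp [hlenH]
            omega
          have hw0 : (H.drop start).take A.length = H[start] :: mid := by
            rw [List.drop_eq_getElem_cons hsx]
            rw [show A.length = (A.length - 1) + 1 by omega, List.take_succ_cons]
          have h5 : (H.drop (start + 1))[A.length - 1]? = some H[start + A.length] := by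
            rw [List.getElem?_drop, show start + 1 + (A.length - 1) = start + A.length by omega]
            exact List.getElem?_eq_getElem hsx2
          have hw1 : (H.drop (start + 1)).take A.length = mid ++ [H[start + A.length]] := by
            calc (H.drop (start + 1)).take A.length
                = (H.drop (start + 1)).take ((A.length - 1) + 1) := by
                  rw [show A.length - 1 + 1 = A.length by omega]
              _ = (H.drop (start + 1)).take (A.length - 1)
                    ++ ((H.drop (start + 1))[A.length - 1]?).toList := List.take_add_one
              _ = mid ++ [H[start + A.length]] := by rw [h5, hmid]; rfl
          rw [hg1, hg2, hroll, pvMod_eq, hw0, hw1, ← hmidlen]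
          exact roll_update H[start] H[start + A.length] mid
        rw [hupd]
        rw [ih (start + 1) (by omega) _ rfl]
        constructor
        · rintro ⟨j, hj, hje⟩
          exact ⟨j + 1, by omega, by rw [show start + (j + 1) = start + 1 + j by omega]; exact hje⟩
        · rintro ⟨j, hj, hje⟩
          rcases Nat.eq_zero_or_pos j with rfl | hjpos
          · exact absurd (by simpa using hje) hw
          · exact ⟨j - 1, by omega, by rw [show start + 1 + (j - 1) = start + j by omega]; exact hje⟩

-- A's scanning loop is True iff some window equals the alias list
theorem anyRange_iff (S A : List String) (hm : A.length ≤ S.length) :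
    ((PySem.List.pyRange 0 ((S.length : Int) - (A.length : Int) + 1) 1).any
        (fun index => PySem.List.slice S (some index) (some (index + (A.length : Int))) == A)) = true
      ↔ ∃ j, j < S.length - A.length + 1 ∧ (S.drop j).take A.length = A := by
  rw [List.any_eq_true]
  constructor
  · rintro ⟨i, hi, hslice⟩
    rw [PySem.List.mem_pyRange_one] at hi
    obtain ⟨h0, hlt⟩ := hi
    obtain ⟨k, rfl⟩ := Int.eq_ofNat_of_zero_le h0
    rw [PySem.List.slice_natCast_add, beq_iff_eq] at hslice
    exact ⟨k, by omega, hslice⟩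
  · rintro ⟨j, hj, hje⟩
    refine ⟨(j : Int), ?_, ?_⟩
    · rw [PySem.List.mem_pyRange_one]
      constructor
      · positivity
      · omega
    · rw [PySem.List.slice_natCast_add, beq_iff_eq]; exact hje

theorem match_alias_eq (symbol_tokens alias_tokens : List String) (match_position : String) :
    match_alias_tokens_py symbol_tokens alias_tokens match_position
      = match_alias_tokens_py_alt symbol_tokens alias_tokens match_position := by
  unfold match_alias_tokens_py match_alias_tokens_py_alt
  by_cases hg : (symbol_tokens.isEmpty || alias_tokens.isEmpty || decide (alias_tokens.length > symbol_tokens.length)) = true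
  · have hg' : ((symbol_tokens.length == 0) || (alias_tokens.length == 0) || decide (alias_tokens.length > symbol_tokens.length)) = true := by
      simpa [List.isEmpty_iff, List.length_eq_zero_iff] using hg
    simp only [hg, hg', if_true]
  · have hg' : ((symbol_tokens.length == 0) || (alias_tokens.length == 0) || decide (alias_tokens.length > symbol_tokens.length)) = false := by
      rw [Bool.not_eq_true] at hg
      simpa [List.isEmpty_iff, List.length_eq_zero_iff] using hg
    rw [Bool.not_eq_true] at hg
    simp only [hg, hg', Bool.false_eq_true, if_false]
    have hgp := hg
    simp only [Bool.or_eq_false_iff, decide_eq_false_iff_not, List.isEmpty_eq_false_iff, not_lt] at hgp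
    obtain ⟨⟨hs, ha⟩, hle⟩ := hgp
    by_cases hp : (match_position == "prefix") = true
    · simp only [hp, if_true]
    · rw [Bool.not_eq_true] at hp
      simp only [hp, Bool.false_eq_true, if_false]
      by_cases hq : (match_position == "suffix") = true
      · simp only [hq, if_true]
        have hpos : 0 < alias_tokens.length := List.length_pos_iff.mpr ha
        rw [show (-(alias_tokens.length : Int)) = -((alias_tokens.length : Nat) : Int) by simp]
        rw [PySem.List.slice_from_neg_natCast _ _ hpos]
        rw [show ((symbol_tokens.length : Int) - (alias_tokens.length : Int))
            = ((symbol_tokens.length - alias_tokens.length : Nat) : Int) by omega]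
        rw [PySem.List.slice_from_natCast]
      · rw [Bool.not_eq_true] at hq
        simp only [hq, Bool.false_eq_true, if_false]
        -- any branch: A's window scan vs B's Rabin-Karp loop
        have hshift : PySem.Int.powMod pvBASE (alias_tokens.length - 1) pvMOD
            = pvBASE ^ (alias_tokens.length - 1) % pvMOD := by
          simp [PySem.Int.powMod, pvMod_eq]
        have htgt : alias_tokens.foldl (fun a t => PySem.Int.mod (a * pvBASE + pvTokenHash t) pvMOD) 0
            = pvPoly (alias_tokens.map pvTokenHash) % pvMOD := by
          rw [← List.foldl_map (f := pvTokenHash)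
            (g := fun r h => PySem.Int.mod (r * pvBASE + h) pvMOD)]
          exact foldl_modStep_zero _
        have hroll0 : (PySem.List.slice (symbol_tokens.map pvTokenHash) none
              (some (alias_tokens.length : Int))).foldl
              (fun r h => PySem.Int.mod (r * pvBASE + h) pvMOD) 0
            = pvPoly (((symbol_tokens.map pvTokenHash).drop 0).take alias_tokens.length) % pvMOD := by
          rw [PySem.List.slice_to_natCast, List.drop_zero]
          exact foldl_modStep_zero _
        rw [htgt, hshift]
        rw [Bool.eq_iff_iff, anyRange_iff _ _ hle,
          pvRkLoop_iff symbol_tokens alias_tokens ha hle (symbol_tokens.length - alias_tokens.length + 1) 0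
            (by omega) _ hroll0]
        simp

-- ===== VERDICT =====
theorem match_alias_tokens_py_spec : Claim_equal_match_alias_tokens_py := by
  intro s a m _
  exact match_alias_eq s a m
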